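-- pv_equiv track=rewrite | github.com/rizkikadafi/algorithm-course | custom_frog3.py | get_mov
-- ===== SOURCE A (Python) =====
-- from heapq import heappush, heappop
-- from enum import IntEnum
-- import heapq
--
-- class Move(IntEnum):
--     NONE = 0,
--     RIGHT = 1,
--     RIGHT2 = 2,
--     LEFT = -1,
--     LEFT2 = -2
--
-- def get_mov(state, goals, possibilities_mov, focus_elm):
--     if len(possibilities_mov) == 1:
--         return possibilities_mov[0]
--
--     zero_idx = state.index(0)
--     goals_focus_elm_idx = goals.index(focus_elm)
--     focus_elm_idx = state.index(focus_elm)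
--     result = []
--
--     for move in possibilities_mov:
--         match move:
--             case Move.RIGHT:
--                 if state[zero_idx + 1] == focus_elm:
--                     heappush(result, (abs(zero_idx - goals_focus_elm_idx), Move.RIGHT))
--                 else:
--                     if zero_idx + 1 == focus_elm_idx + 1 or zero_idx + 1 == focus_elm_idx + 2 or zero_idx + 1 == focus_elm_idx - 1 or zero_idx + 1 == focus_elm_idx - 2:
--                         heappush(result, (abs(zero_idx + 1 - goals_focus_elm_idx), Move.RIGHT))
--                     else:
--                         heappush(result, (abs(focus_elm_idx - goals_focus_elm_idx), Move.RIGHT))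
--             case Move.RIGHT2:
--                 if state[zero_idx + 2] == focus_elm:
--                     heappush(result, (abs(zero_idx - goals_focus_elm_idx), Move.RIGHT2))
--                 else:
--                     if zero_idx + 2 == focus_elm_idx + 1 or zero_idx + 2 == focus_elm_idx + 2 or zero_idx + 2 == focus_elm_idx - 1 or zero_idx + 2 == focus_elm_idx - 2:
--                         heappush(result, (abs(zero_idx + 2 - goals_focus_elm_idx), Move.RIGHT2))
--                     else:
--                         heappush(result, (abs(focus_elm_idx - goals_focus_elm_idx), Move.RIGHT2))
--             case Move.LEFT:
--                 if state[zero_idx - 1] == focus_elm: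
--                     heappush(result, (abs(zero_idx - goals_focus_elm_idx), Move.LEFT))
--                 else:
--                     if zero_idx - 1 == focus_elm_idx + 1 or zero_idx - 1 == focus_elm_idx + 2 or zero_idx - 1 == focus_elm_idx - 1 or zero_idx - 1 == focus_elm_idx - 2:
--                         heappush(result, (abs(zero_idx - 1 - goals_focus_elm_idx), Move.LEFT))
--                     else:
--                         heappush(result, (abs(focus_elm_idx - goals_focus_elm_idx), Move.LEFT))
--             case Move.LEFT2:
--                 if state[zero_idx - 2] == focus_elm:
--                     heappush(result, (abs(zero_idx - goals_focus_elm_idx), Move.LEFT2))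
--                 else:
--                     if zero_idx - 2 == focus_elm_idx + 1 or zero_idx - 2 == focus_elm_idx + 2 or zero_idx - 2 == focus_elm_idx - 1 or zero_idx - 2 == focus_elm_idx - 2:
--                         heappush(result, (abs(zero_idx - 2 - goals_focus_elm_idx), Move.LEFT2))
--                     else:
--                         heappush(result, (abs(focus_elm_idx - goals_focus_elm_idx), Move.LEFT2))
--
--     res = heapq.nsmallest(2, result)
--     if len(res) > 1 and res[0][0] == res[1][0]:
--         return res[1][1]
--     else:
--         return heappop(result)[1]
-- ===== SOURCE B (Python) =====
-- def get_mov(state, goals, possibilities_mov, focus_elm):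
--     if len(possibilities_mov) == 1:
--         return possibilities_mov[0]
--
--     zero_idx = state.index(0)
--     goal_idx = goals.index(focus_elm)
--     focus_idx = state.index(focus_elm)
--
--     # single streaming pass: keep only the two lexicographically smallest
--     # (distance, move) candidates in two registers; no list, no heap, no sort
--     best = None
--     second = None
--     for move in possibilities_mov:
--         if move not in (1, 2, -1, -2):
--             continue
--         target = zero_idx + move
--         if state[target] == focus_elm:
--             dist = abs(zero_idx - goal_idx)
--         elif 1 <= abs(target - focus_idx) <= 2:
--             dist = abs(target - goal_idx)
--         else:
--             dist = abs(focus_idx - goal_idx)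
--         cand = (dist, move)
--         if best is None or cand < best:
--             second = best
--             best = cand
--         elif second is None or cand < second:
--             second = cand
--
--     if second is not None and second[0] == best[0]:
--         return second[1]
--     return best[1]
-- ===== Notes on version B (the rewrite author's own statement) =====
-- stated objective: alternative
-- what changed: B collapses A's four near-identical match arms into one uniform target/distance rule and replaces the whole heap-build + nsmallest + heappop selection by a single streaming pass that keeps just the two lexicographically smallest (distance, move) candidates in two registers, returning from them directly (no heap, no list, no sort).
import Mathlib
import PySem

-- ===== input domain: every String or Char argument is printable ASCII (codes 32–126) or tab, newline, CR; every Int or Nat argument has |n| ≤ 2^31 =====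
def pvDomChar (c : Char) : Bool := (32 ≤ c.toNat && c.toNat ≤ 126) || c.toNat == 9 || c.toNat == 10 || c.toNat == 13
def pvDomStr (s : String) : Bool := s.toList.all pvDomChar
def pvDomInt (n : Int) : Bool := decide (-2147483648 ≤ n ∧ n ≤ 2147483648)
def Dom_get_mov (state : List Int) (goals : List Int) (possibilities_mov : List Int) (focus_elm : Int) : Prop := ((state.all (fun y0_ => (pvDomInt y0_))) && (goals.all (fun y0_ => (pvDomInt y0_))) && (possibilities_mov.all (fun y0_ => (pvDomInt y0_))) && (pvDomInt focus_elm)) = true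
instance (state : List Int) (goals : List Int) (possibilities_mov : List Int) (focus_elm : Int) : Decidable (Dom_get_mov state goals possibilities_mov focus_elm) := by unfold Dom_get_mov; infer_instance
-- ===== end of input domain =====

-- B replaces A's four match arms + heap-build + nsmallest/heappop selection by a single
-- streaming pass that keeps only the two smallest (distance, move) candidates in two
-- registers (objective: alternative decomposition; same return value).

-- ===== PORT A =====

-- Python tuple '<' on int pairs (the comparison heapq performs)
def pyTupLt (a b : Int × Int) : Bool := a.1 < b.1 || (a.1 == b.1 && a.2 < b.2)

-- heapq._siftdown(heap, 0, pos) where `item` is heap[pos]: functional transliteration of the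
-- CPython loop (shift parents down the ancestor chain, then place item).
def pySiftdown (heap : List (Int × Int)) (pos : Nat) (item : Int × Int) : List (Int × Int) :=
  if pos = 0 then heap.set 0 item
  else if pyTupLt item (heap[(pos - 1) / 2]?.getD (0, 0)) then
    pySiftdown (heap.set pos (heap[(pos - 1) / 2]?.getD (0, 0))) ((pos - 1) / 2) item
  else heap.set pos item
termination_by pos
decreasing_by omega

-- heapq.heappush: heap.append(item); _siftdown(heap, 0, len(heap)-1)
def pyHeappush (heap : List (Int × Int)) (item : Int × Int) : List (Int × Int) :=
  pySiftdown (heap ++ [item]) heap.length item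

-- the body of A's `for move in possibilities_mov:` loop (one `match` on move, four arms)
def stepA (state : List Int) (focus_elm zero_idx gidx fidx : Int)
    (result : List (Int × Int)) (move : Int) : List (Int × Int) :=
  if move = 1 then
    if (PySem.List.pyGet? state (zero_idx + 1)).getD 0 = focus_elm then
      pyHeappush result (((zero_idx - gidx).natAbs : Int), 1)
    else if zero_idx + 1 = fidx + 1 ∨ zero_idx + 1 = fidx + 2 ∨ zero_idx + 1 = fidx - 1 ∨ zero_idx + 1 = fidx - 2 then
      pyHeappush result (((zero_idx + 1 - gidx).natAbs : Int), 1)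
    else pyHeappush result (((fidx - gidx).natAbs : Int), 1)
  else if move = 2 then
    if (PySem.List.pyGet? state (zero_idx + 2)).getD 0 = focus_elm then
      pyHeappush result (((zero_idx - gidx).natAbs : Int), 2)
    else if zero_idx + 2 = fidx + 1 ∨ zero_idx + 2 = fidx + 2 ∨ zero_idx + 2 = fidx - 1 ∨ zero_idx + 2 = fidx - 2 then
      pyHeappush result (((zero_idx + 2 - gidx).natAbs : Int), 2)
    else pyHeappush result (((fidx - gidx).natAbs : Int), 2)
  else if move = -1 then
    if (PySem.List.pyGet? state (zero_idx - 1)).getD 0 = focus_elm then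
      pyHeappush result (((zero_idx - gidx).natAbs : Int), -1)
    else if zero_idx - 1 = fidx + 1 ∨ zero_idx - 1 = fidx + 2 ∨ zero_idx - 1 = fidx - 1 ∨ zero_idx - 1 = fidx - 2 then
      pyHeappush result (((zero_idx - 1 - gidx).natAbs : Int), -1)
    else pyHeappush result (((fidx - gidx).natAbs : Int), -1)
  else if move = -2 then
    if (PySem.List.pyGet? state (zero_idx - 2)).getD 0 = focus_elm then
      pyHeappush result (((zero_idx - gidx).natAbs : Int), -2)
    else if zero_idx - 2 = fidx + 1 ∨ zero_idx - 2 = fidx + 2 ∨ zero_idx - 2 = fidx - 1 ∨ zero_idx - 2 = fidx - 2 then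
      pyHeappush result (((zero_idx - 2 - gidx).natAbs : Int), -2)
    else pyHeappush result (((fidx - gidx).natAbs : Int), -2)
  else result  -- Move.NONE and any other value: no case matches

def get_mov (state : List Int) (goals : List Int) (possibilities_mov : List Int) (focus_elm : Int) : Int :=
  if possibilities_mov.length = 1 then (PySem.List.pyGet? possibilities_mov 0).getD 0
  else
    let zero_idx : Int := ((PySem.List.index? state 0).getD 0 : Nat)
    let gidx : Int := ((PySem.List.index? goals focus_elm).getD 0 : Nat)
    let fidx : Int := ((PySem.List.index? state focus_elm).getD 0 : Nat)
    let result := possibilities_mov.foldl (stepA state focus_elm zero_idx gidx fidx) []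
    -- heapq.nsmallest(2, result) ≡ sorted(result)[:2] (documented equivalence; tuple key)
    let res := (PySem.List.sorted2 result Prod.fst Prod.snd).take 2
    if res.length > 1 ∧ (res.getD 0 (0, 0)).1 = (res.getD 1 (0, 0)).1 then (res.getD 1 (0, 0)).2
    -- heappop(result)[1]: heappop returns the heap root result[0] (Pre_ excludes the empty heap)
    else (result.getD 0 (0, 0)).2

-- ===== PORT B =====

-- Python tuple '<' on the (dist, move) pairs B compares
def tupLtB (a b : Int × Int) : Bool := a.1 < b.1 || (a.1 == b.1 && a.2 < b.2)

-- the body of B's streaming loop: state is the pair of registers (best, second)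
def stepB (state : List Int) (focus_elm zero_idx gidx fidx : Int)
    (st : Option (Int × Int) × Option (Int × Int)) (move : Int) :
    Option (Int × Int) × Option (Int × Int) :=
  if move = 1 ∨ move = 2 ∨ move = -1 ∨ move = -2 then
    let target := zero_idx + move
    let dist : Int :=
      if (PySem.List.pyGet? state target).getD 0 = focus_elm then ((zero_idx - gidx).natAbs : Int)
      else if 1 ≤ (target - fidx).natAbs ∧ (target - fidx).natAbs ≤ 2 then ((target - gidx).natAbs : Int)
      else ((fidx - gidx).natAbs : Int)
    let cand := (dist, move)
    match st.1 with
    | none => (some cand, st.1)              -- best is None: second = best; best = cand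
    | some b =>
      if tupLtB cand b then (some cand, st.1)  -- cand < best: second = best; best = cand
      else
        match st.2 with
        | none => (st.1, some cand)            -- second is None: second = cand
        | some s => if tupLtB cand s then (st.1, some cand) else st
  else st

def get_mov_alt (state : List Int) (goals : List Int) (possibilities_mov : List Int) (focus_elm : Int) : Int :=
  if possibilities_mov.length = 1 then possibilities_mov.headD 0
  else
    let zero_idx : Int := ((PySem.List.index? state 0).getD 0 : Nat)
    let gidx : Int := ((PySem.List.index? goals focus_elm).getD 0 : Nat)
    let fidx : Int := ((PySem.List.index? state focus_elm).getD 0 : Nat)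
    let st := possibilities_mov.foldl (stepB state focus_elm zero_idx gidx fidx) (none, none)
    if st.2 ≠ none ∧ (st.2.getD (0, 0)).1 = (st.1.getD (0, 0)).1 then (st.2.getD (0, 0)).2
    else (st.1.getD (0, 0)).2

-- ===== PRECONDITION & SPEC =====
-- Pre_ excludes exactly the inputs where Python A raises: a missing 0/focus_elm for .index
-- (ValueError), a move target outside Python's index range (IndexError), and no applicable
-- move at all, in which case heappop on the empty heap raises IndexError.
def Pre_get_mov (state : List Int) (goals : List Int) (possibilities_mov : List Int) (focus_elm : Int) : Prop :=
  possibilities_mov.length = 1 ∨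
  ((0 : Int) ∈ state ∧ focus_elm ∈ goals ∧ focus_elm ∈ state ∧
   (∃ m ∈ possibilities_mov, m = 1 ∨ m = 2 ∨ m = -1 ∨ m = -2) ∧
   (∀ m ∈ possibilities_mov, (m = 1 ∨ m = 2 ∨ m = -1 ∨ m = -2) →
     -(state.length : Int) ≤ (state.idxOf 0 : Int) + m ∧ (state.idxOf 0 : Int) + m < (state.length : Int)))
instance (state : List Int) (goals : List Int) (possibilities_mov : List Int) (focus_elm : Int) : Decidable (Pre_get_mov state goals possibilities_mov focus_elm) := by unfold Pre_get_mov; infer_instance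

def pvWitness_get_mov : List Int × List Int × List Int × Int := ([0, 1], [1, 0], [1, -1], 1)

def Spec_get_mov (state : List Int) (goals : List Int) (possibilities_mov : List Int) (focus_elm : Int) (out : Int) : Prop := out = get_mov_alt state goals possibilities_mov focus_elm
instance (state : List Int) (goals : List Int) (possibilities_mov : List Int) (focus_elm : Int) (out : Int) : Decidable (Spec_get_mov state goals possibilities_mov focus_elm out) := by unfold Spec_get_mov; infer_instance

-- ===== CLAIM (what is proved, stated in full; the proofs are below) =====
def Claim_equal_get_mov : Prop := ∀ (state : List Int) (goals : List Int) (possibilities_mov : List Int) (focus_elm : Int), Dom_get_mov state goals possibilities_mov focus_elm → Pre_get_mov state goals possibilities_mov focus_elm → Spec_get_mov state goals possibilities_mov focus_elm (get_mov state goals possibilities_mov focus_elm)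

-- ===== LEMMAS AND PROOFS =====

-- proof-side helper: the flat list of (dist, move) pairs A's loop pushes, in loop order
def stepL (state : List Int) (focus_elm zero_idx gidx fidx : Int)
    (result : List (Int × Int)) (move : Int) : List (Int × Int) :=
  if move = 1 ∨ move = 2 ∨ move = -1 ∨ move = -2 then
    let target := zero_idx + move
    let dist : Int :=
      if (PySem.List.pyGet? state target).getD 0 = focus_elm then ((zero_idx - gidx).natAbs : Int)
      else if 1 ≤ (target - fidx).natAbs ∧ (target - fidx).natAbs ≤ 2 then ((target - gidx).natAbs : Int)
      else ((fidx - gidx).natAbs : Int)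
    result ++ [(dist, move)]
  else result

-- Python's '≤' on int pairs (lexicographic), as a Prop
def leP (a b : Int × Int) : Prop := a.1 < b.1 ∨ (a.1 = b.1 ∧ a.2 ≤ b.2)

theorem leP_refl (a : Int × Int) : leP a a := by simp [leP]

theorem leP_trans {a b c : Int × Int} (h1 : leP a b) (h2 : leP b c) : leP a c := by
  rcases h1 with h1 | ⟨h1, h1'⟩ <;> rcases h2 with h2 | ⟨h2, h2'⟩ <;> simp only [leP] <;> omega

theorem leP_antisymm {a b : Int × Int} (h1 : leP a b) (h2 : leP b a) : a = b := by
  rcases a with ⟨a1, a2⟩; rcases b with ⟨b1, b2⟩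
  simp only [leP] at h1 h2
  have : a1 = b1 ∧ a2 = b2 := by omega
  simp [this.1, this.2]

theorem pyTupLt_true_iff {a b : Int × Int} :
    pyTupLt a b = true ↔ (a.1 < b.1 ∨ (a.1 = b.1 ∧ a.2 < b.2)) := by
  simp [pyTupLt]

theorem leP_of_pyTupLt {a b : Int × Int} (h : pyTupLt a b = true) : leP a b := by
  rw [pyTupLt_true_iff] at h
  simp only [leP]; omega

theorem leP_of_not_pyTupLt {a b : Int × Int} (h : pyTupLt a b = false) : leP b a := by
  have hiff : ¬ (a.1 < b.1 ∨ (a.1 = b.1 ∧ a.2 < b.2)) := by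
    rw [← pyTupLt_true_iff]; simp [h]
  simp only [leP]; omega

-- sorted2 with the two projections is the insertBy fold with the lexicographic strict order
def bLex (a b : Int × Int) : Bool := decide (a.1 < b.1) || (!decide (b.1 < a.1) && decide (a.2 < b.2))

theorem bLex_eq_pyTupLt (a b : Int × Int) : bLex a b = pyTupLt a b := by
  simp only [bLex, pyTupLt]
  by_cases h1 : a.1 < b.1 <;> by_cases h2 : b.1 < a.1 <;> by_cases h3 : a.1 = b.1 <;>
    simp_all <;> omega

theorem sorted2_eq_fold (xs : List (Int × Int)) :
    PySem.List.sorted2 xs Prod.fst Prod.snd =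
      xs.foldl (fun acc x => PySem.List.insertBy bLex x acc) [] := rfl

theorem insertBy_nil (x : Int × Int) : PySem.List.insertBy bLex x [] = [x] := rfl

theorem insertBy_cons (x y : Int × Int) (ys : List (Int × Int)) :
    PySem.List.insertBy bLex x (y :: ys) =
      if bLex x y then x :: y :: ys else y :: PySem.List.insertBy bLex x ys := rfl

theorem pairwise_insertBy (x : Int × Int) (ys : List (Int × Int)) (h : ys.Pairwise leP) :
    (PySem.List.insertBy bLex x ys).Pairwise leP := by
  induction ys with
  | nil => simp [insertBy_nil]
  | cons y ys ih =>
    rw [List.pairwise_cons] at h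
    rw [insertBy_cons]
    by_cases hb : bLex x y = true
    · have hxy : leP x y := leP_of_pyTupLt (by rwa [bLex_eq_pyTupLt] at hb)
      rw [if_pos hb]
      refine List.Pairwise.cons ?_ (List.Pairwise.cons h.1 h.2)
      intro z hz
      rcases List.mem_cons.mp hz with rfl | hz
      · exact hxy
      · exact leP_trans hxy (h.1 z hz)
    · have hb' : pyTupLt x y = false := by
        rw [← bLex_eq_pyTupLt]; exact Bool.eq_false_iff.mpr hb
      have hyx : leP y x := leP_of_not_pyTupLt hb'
      rw [if_neg hb]
      refine List.Pairwise.cons ?_ (ih h.2)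
      intro z hz
      rw [PySem.List.mem_insertBy] at hz
      rcases hz with rfl | hz
      · exact hyx
      · exact h.1 z hz

theorem sorted2_pairwise (xs : List (Int × Int)) :
    (PySem.List.sorted2 xs Prod.fst Prod.snd).Pairwise leP := by
  rw [sorted2_eq_fold]
  suffices hgen : ∀ (l : List (Int × Int)) (acc : List (Int × Int)), acc.Pairwise leP →
      (l.foldl (fun acc x => PySem.List.insertBy bLex x acc) acc).Pairwise leP from
    hgen xs [] (by simp)
  intro l
  induction l with
  | nil => intro acc h; simpa
  | cons a l ih => intro acc h; exact ih _ (pairwise_insertBy a acc h)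

theorem sorted2_eq_of_perm {xs ys : List (Int × Int)} (h : xs.Perm ys) :
    PySem.List.sorted2 xs Prod.fst Prod.snd = PySem.List.sorted2 ys Prod.fst Prod.snd := by
  have hp : (PySem.List.sorted2 xs Prod.fst Prod.snd).Perm
      (PySem.List.sorted2 ys Prod.fst Prod.snd) :=
    ((PySem.List.sorted2_perm xs _ _ _).trans h).trans (PySem.List.sorted2_perm ys _ _ _).symm
  exact hp.eq_of_pairwise (fun a b _ _ h1 h2 => leP_antisymm h1 h2)
    (sorted2_pairwise xs) (sorted2_pairwise ys)

-- set at an index is, as a multiset, replace-with-cons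
theorem set_perm_cons_eraseIdx (t : List (Int × Int)) (k : Nat) (v : Int × Int)
    (hk : k < t.length) : (t.set k v).Perm (v :: t.eraseIdx k) := by
  induction t generalizing k with
  | nil => simp at hk
  | cons b t ih =>
    cases k with
    | zero => simp
    | succ k =>
      simp only [List.set_cons_succ, List.eraseIdx_cons_succ]
      exact (List.Perm.cons b (ih k (by simpa using hk))).trans (List.Perm.swap v b _)

theorem set_elem_eraseIdx_perm (l : List (Int × Int)) (i j : Nat)
    (hij : i < j) (hj : j < l.length) :
    ((l.set j (l[i]?.getD (0, 0))).eraseIdx i).Perm (l.eraseIdx j) := by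
  induction l generalizing i j with
  | nil => simp at hj
  | cons a l ih =>
    cases i with
    | zero =>
      cases j with
      | zero => omega
      | succ j =>
        simp only [List.getElem?_cons_zero, Option.getD_some, List.set_cons_succ,
          List.eraseIdx_cons_zero, List.eraseIdx_cons_succ]
        exact set_perm_cons_eraseIdx l j a (by simpa using hj)
    | succ i =>
      cases j with
      | zero => omega
      | succ j =>
        simp only [List.getElem?_cons_succ, List.set_cons_succ, List.eraseIdx_cons_succ]
        exact List.Perm.cons a (ih i j (by omega) (by simpa using hj))

theorem pySiftdown_perm (pos : Nat) (l : List (Int × Int)) (item : Int × Int)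
    (h : pos < l.length) : (pySiftdown l pos item).Perm (item :: l.eraseIdx pos) := by
  induction pos using Nat.strong_induction_on generalizing l with
  | _ pos ih =>
    rw [pySiftdown]
    split_ifs with h0 hb
    · subst h0
      exact set_perm_cons_eraseIdx l 0 item h
    · have hpplt : (pos - 1) / 2 < pos := by omega
      have hrec := ih _ hpplt (l.set pos (l[(pos - 1) / 2]?.getD (0, 0)))
        (by rw [List.length_set]; omega)
      refine hrec.trans (List.Perm.cons item ?_)
      exact set_elem_eraseIdx_perm l ((pos - 1) / 2) pos (by omega) h
    · exact set_perm_cons_eraseIdx l pos item h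

theorem pyHeappush_perm (heap : List (Int × Int)) (item : Int × Int) :
    (pyHeappush heap item).Perm (item :: heap) := by
  have h := pySiftdown_perm heap.length (heap ++ [item]) item (by simp)
  rwa [List.eraseIdx_append_of_length_le (Nat.le_refl _), Nat.sub_self, List.eraseIdx_zero,
    List.tail_cons, List.append_nil] at h

-- heap root is a minimum
def RootLe (l : List (Int × Int)) : Prop :=
  ∀ i, i < l.length → leP (l[0]?.getD (0, 0)) (l[i]?.getD (0, 0))

theorem gdset_self {l : List (Int × Int)} {p : Nat} (v : Int × Int) (hp : p < l.length) :
    (l.set p v)[p]?.getD (0, 0) = v := by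
  simp [hp]

theorem gdset_ne {l : List (Int × Int)} {p i : Nat} (v : Int × Int) (h : p ≠ i) :
    (l.set p v)[i]?.getD (0, 0) = l[i]?.getD (0, 0) := by
  simp [List.getElem?_set_ne h]

theorem pySiftdown_min (pos : Nat) (l : List (Int × Int)) (item : Int × Int)
    (h : pos < l.length)
    (hroot : ∀ i, i < l.length → i ≠ pos → leP (l[0]?.getD (0, 0)) (l[i]?.getD (0, 0)))
    (hzero : pos = 0 → ∀ i, i < l.length → i ≠ 0 → leP item (l[i]?.getD (0, 0))) :
    RootLe (pySiftdown l pos item) := by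
  induction pos using Nat.strong_induction_on generalizing l with
  | _ pos ih =>
    rw [pySiftdown]
    split_ifs with h0 hb
    · subst h0
      intro i hi
      rw [List.length_set] at hi
      rw [gdset_self item h]
      by_cases hi0 : i = 0
      · subst hi0; rw [gdset_self item h]; exact leP_refl item
      · rw [gdset_ne item (fun hc => hi0 hc.symm)]
        exact hzero rfl i hi hi0
    · -- item moved up past the parent
      set pp := (pos - 1) / 2 with hpp
      have hpplt : pp < pos := by omega
      apply ih pp hpplt (l.set pos (l[pp]?.getD (0, 0))) (by rw [List.length_set]; omega)
      · intro i hi hne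
        rw [List.length_set] at hi
        rw [gdset_ne _ (fun hc => h0 hc)]
        by_cases hip : i = pos
        · subst hip
          rw [gdset_self _ h]
          exact hroot pp (by omega) (by omega)
        · rw [gdset_ne _ (fun hc => hip hc.symm)]
          exact hroot i hi hip
      · intro hpz i hi hne
        rw [List.length_set] at hi
        have hle : leP item (l[pp]?.getD (0, 0)) := leP_of_pyTupLt hb
        by_cases hip : i = pos
        · subst hip
          rw [gdset_self _ h]
          exact hle
        · rw [gdset_ne _ (fun hc => hip hc.symm)]
          refine leP_trans hle ?_
          rw [hpz] at hle ⊢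
          exact hroot i hi hip
    · -- item stays at pos; the parent is at most item, so the root still bounds everything
      intro i hi
      rw [List.length_set] at hi
      rw [gdset_ne item (fun hc => h0 hc)]
      by_cases hip : i = pos
      · rw [hip, gdset_self item h]
        have hble : pyTupLt item (l[(pos - 1) / 2]?.getD (0, 0)) = false :=
          Bool.eq_false_iff.mpr hb
        exact leP_trans (hroot ((pos - 1) / 2) (by omega) (by omega)) (leP_of_not_pyTupLt hble)
      · rw [gdset_ne item (fun hc => hip hc.symm)]
        exact hroot i hi hip

theorem gd_append_left (l t : List (Int × Int)) (i : Nat) (hi : i < l.length) :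
    (l ++ t)[i]?.getD (0, 0) = l[i]?.getD (0, 0) := by
  simp [List.getElem?_append_left hi]

theorem pyHeappush_min (heap : List (Int × Int)) (item : Int × Int) (h : RootLe heap) :
    RootLe (pyHeappush heap item) := by
  unfold pyHeappush
  apply pySiftdown_min heap.length (heap ++ [item]) item (by simp)
  · intro i hi hne
    have hil : i < heap.length := by simp at hi; omega
    have h0l : 0 < heap.length := by omega
    rw [gd_append_left heap [item] i hil, gd_append_left heap [item] 0 h0l]
    exact h i hil
  · intro hz i hi hne
    simp at hi
    omega

-- the collapse of A's four match arms: for an applicable move both A's loop body and the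
-- flat-list body push/append the same (distance, move) pair
theorem push_append_perm {h b : List (Int × Int)} (hp : h.Perm b) (p : Int × Int) :
    (pyHeappush h p).Perm (b ++ [p]) :=
  (pyHeappush_perm h p).trans ((hp.cons p).trans (List.perm_append_singleton p b).symm)

theorem stepA_eq_invalid (state : List Int) (focus_elm zero_idx gidx fidx : Int)
    (h : List (Int × Int)) (m : Int) (hm : ¬(m = 1 ∨ m = 2 ∨ m = -1 ∨ m = -2)) :
    stepA state focus_elm zero_idx gidx fidx h m = h := by
  rw [not_or, not_or, not_or] at hm
  simp [stepA, hm.1, hm.2.1, hm.2.2.1, hm.2.2.2]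

theorem stepL_eq_invalid (state : List Int) (focus_elm zero_idx gidx fidx : Int)
    (b : List (Int × Int)) (m : Int) (hm : ¬(m = 1 ∨ m = 2 ∨ m = -1 ∨ m = -2)) :
    stepL state focus_elm zero_idx gidx fidx b m = b := by
  simp [stepL, hm]

theorem step_perm (state : List Int) (focus_elm zero_idx gidx fidx : Int)
    {h b : List (Int × Int)} (hp : h.Perm b) (m : Int) :
    (stepA state focus_elm zero_idx gidx fidx h m).Perm
      (stepL state focus_elm zero_idx gidx fidx b m) := by
  by_cases hm : m = 1 ∨ m = 2 ∨ m = -1 ∨ m = -2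
  · rcases hm with rfl | rfl | rfl | rfl <;>
    · simp only [stepA, stepL]
      norm_num
      ring_nf
      split_ifs <;> first | exact push_append_perm hp _ | omega
  · rw [stepA_eq_invalid state focus_elm zero_idx gidx fidx h m hm,
      stepL_eq_invalid state focus_elm zero_idx gidx fidx b m hm]
    exact hp

theorem fold_perm (state : List Int) (focus_elm zero_idx gidx fidx : Int)
    (pm : List Int) {h b : List (Int × Int)} (hp : h.Perm b) :
    (pm.foldl (stepA state focus_elm zero_idx gidx fidx) h).Perm
      (pm.foldl (stepL state focus_elm zero_idx gidx fidx) b) := by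
  induction pm generalizing h b with
  | nil => simpa
  | cons m pm ih =>
    exact ih (step_perm state focus_elm zero_idx gidx fidx hp m)

theorem stepA_min (state : List Int) (focus_elm zero_idx gidx fidx : Int)
    (h : List (Int × Int)) (m : Int) (hr : RootLe h) :
    RootLe (stepA state focus_elm zero_idx gidx fidx h m) := by
  unfold stepA
  split_ifs <;> first | exact pyHeappush_min _ _ hr | exact hr

theorem fold_min (state : List Int) (focus_elm zero_idx gidx fidx : Int)
    (pm : List Int) (h : List (Int × Int)) (hr : RootLe h) :
    RootLe (pm.foldl (stepA state focus_elm zero_idx gidx fidx) h) := by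
  induction pm generalizing h with
  | nil => simpa
  | cons m pm ih => exact ih _ (stepA_min state focus_elm zero_idx gidx fidx h m hr)

-- the root of A's heap equals the head of the sorted list
theorem root_eq_sorted_head (ra rb : List (Int × Int)) (hperm : ra.Perm rb)
    (hne : rb ≠ []) (hmin : RootLe ra) :
    ra[0]?.getD (0, 0) = (PySem.List.sorted2 rb Prod.fst Prod.snd)[0]?.getD (0, 0) := by
  have hSperm : (PySem.List.sorted2 rb Prod.fst Prod.snd).Perm rb :=
    PySem.List.sorted2_perm rb _ _ _
  have hSpw := sorted2_pairwise rb
  rcases hS : PySem.List.sorted2 rb Prod.fst Prod.snd with _ | ⟨s0, st⟩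
  · rw [hS] at hSperm
    exact absurd hSperm.symm.eq_nil hne
  rw [hS] at hSperm hSpw
  rcases hra : ra with _ | ⟨a0, rt⟩
  · rw [hra] at hperm
    exact absurd hperm.symm.eq_nil hne
  rw [hra] at hperm hmin
  have hs0mem : s0 ∈ a0 :: rt := (hperm.trans hSperm.symm).mem_iff.mpr List.mem_cons_self
  obtain ⟨i, hi, hieq⟩ := List.mem_iff_getElem.mp hs0mem
  have h1 : leP a0 s0 := by
    have := hmin i hi
    simpa [List.getElem?_eq_getElem hi, hieq] using this
  have ha0mem : a0 ∈ s0 :: st := (hperm.trans hSperm.symm).mem_iff.mp List.mem_cons_self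
  have h2 : leP s0 a0 := by
    rcases List.mem_cons.mp ha0mem with rfl | hmem
    · exact leP_refl a0
    · exact (List.pairwise_cons.mp hSpw).1 a0 hmem
  simpa using leP_antisymm h1 h2

-- B's streaming registers are the first two elements of the sorted candidate list

theorem sorted2_append_singleton (l : List (Int × Int)) (p : Int × Int) :
    PySem.List.sorted2 (l ++ [p]) Prod.fst Prod.snd =
      PySem.List.insertBy bLex p (PySem.List.sorted2 l Prod.fst Prod.snd) := by
  rw [sorted2_eq_fold, sorted2_eq_fold, List.foldl_append]
  rfl

theorem tupLtB_eq_bLex (a b : Int × Int) : tupLtB a b = bLex a b := by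
  rw [bLex_eq_pyTupLt]; rfl

-- how inserting x changes the first two elements of a list (purely structural)
theorem firstTwo_insertBy (x : Int × Int) (s : List (Int × Int)) :
    ((PySem.List.insertBy bLex x s)[0]?, (PySem.List.insertBy bLex x s)[1]?) =
      match s[0]? with
      | none => (some x, none)
      | some s0 =>
        if bLex x s0 then (some x, some s0)
        else (some s0, match s[1]? with
              | none => some x
              | some s1 => if bLex x s1 then some x else some s1) := by
  match s with
  | [] => simp [insertBy_nil]
  | [s0] =>
    rw [insertBy_cons]
    by_cases h : bLex x s0 = true <;> simp [h, insertBy_nil]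
  | s0 :: s1 :: t =>
    rw [insertBy_cons]
    by_cases h0 : bLex x s0 = true
    · simp [h0]
    · rw [insertBy_cons]
      by_cases h1 : bLex x s1 = true <;> simp [h0, h1]

-- the streaming fold computes exactly the first two elements of the sorted flat list
theorem stream_firstTwo (state : List Int) (focus_elm zero_idx gidx fidx : Int)
    (pm : List Int) :
    ∀ (acc : List (Int × Int)) (st : Option (Int × Int) × Option (Int × Int)),
      st = ((PySem.List.sorted2 acc Prod.fst Prod.snd)[0]?,
            (PySem.List.sorted2 acc Prod.fst Prod.snd)[1]?) →
      pm.foldl (stepB state focus_elm zero_idx gidx fidx) st =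
        ((PySem.List.sorted2 (pm.foldl (stepL state focus_elm zero_idx gidx fidx) acc)
            Prod.fst Prod.snd)[0]?,
         (PySem.List.sorted2 (pm.foldl (stepL state focus_elm zero_idx gidx fidx) acc)
            Prod.fst Prod.snd)[1]?) := by
  induction pm with
  | nil => intro acc st h; simpa using h
  | cons m pm ih =>
    intro acc st h
    simp only [List.foldl_cons]
    by_cases hm : m = 1 ∨ m = 2 ∨ m = -1 ∨ m = -2
    · apply ih
      rw [show stepL state focus_elm zero_idx gidx fidx acc m =
          acc ++ [((if (PySem.List.pyGet? state (zero_idx + m)).getD 0 = focus_elm then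
              ((zero_idx - gidx).natAbs : Int)
            else if 1 ≤ (zero_idx + m - fidx).natAbs ∧ (zero_idx + m - fidx).natAbs ≤ 2 then
              ((zero_idx + m - gidx).natAbs : Int)
            else ((fidx - gidx).natAbs : Int)), m)] from by simp [stepL, hm],
        sorted2_append_singleton]
      rw [firstTwo_insertBy]
      simp only [stepB, if_pos hm, h]
      rcases hs0 : (PySem.List.sorted2 acc Prod.fst Prod.snd)[0]? with _ | s0
      · have : (PySem.List.sorted2 acc Prod.fst Prod.snd)[1]? = none := by
          rcases hS : PySem.List.sorted2 acc Prod.fst Prod.snd with _ | ⟨a, t⟩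
          · simp
          · rw [hS] at hs0; simp at hs0
        simp [this]
      · simp only [tupLtB_eq_bLex]
        split_ifs <;>
          first
            | rfl
            | (rcases hs1 : (PySem.List.sorted2 acc Prod.fst Prod.snd)[1]? with _ | s1 <;>
                first | rfl | (split <;> first | rfl | (split_ifs <;> simp_all)))
    · rw [show stepB state focus_elm zero_idx gidx fidx st m = st from by simp [stepB, hm],
        stepL_eq_invalid state focus_elm zero_idx gidx fidx acc m hm]
      exact ih acc st h

-- ===== VERDICT (by name: the statement is the Claim_ definition above) =====
theorem get_mov_spec : Claim_equal_get_mov := by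
  intro state goals pm fe hdom hpre
  unfold Spec_get_mov
  by_cases hl : pm.length = 1
  · obtain ⟨x, rfl⟩ := List.length_eq_one_iff.mp hl
    simp [get_mov, get_mov_alt]
  · rcases hpre with hl' | ⟨h0, hg, hf, hex, _⟩
    · exact absurd hl' hl
    simp only [get_mov, get_mov_alt, if_neg hl]
    set Z : Int := (((PySem.List.index? state (0 : Int)).getD 0 : Nat) : Int) with hZ
    set G : Int := (((PySem.List.index? goals fe).getD 0 : Nat) : Int) with hG
    set F : Int := (((PySem.List.index? state fe).getD 0 : Nat) : Int) with hF
    set RA := pm.foldl (stepA state fe Z G F) [] with hRA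
    set L := pm.foldl (stepL state fe Z G F) [] with hL
    have hperm : RA.Perm L := fold_perm state fe Z G F pm (List.Perm.refl [])
    have hSS : PySem.List.sorted2 RA Prod.fst Prod.snd =
        PySem.List.sorted2 L Prod.fst Prod.snd := sorted2_eq_of_perm hperm
    have hstream := stream_firstTwo state fe Z G F pm [] (none, none) (by rfl)
    rw [← hL] at hstream
    set S := PySem.List.sorted2 L Prod.fst Prod.snd with hS
    have hroot : RootLe RA := fold_min state fe Z G F pm [] (by intro i hi; simp at hi)
    rw [hSS, hstream]
    rcases hScases : S with _ | ⟨a, t⟩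
    · -- no candidate at all: both sides fall through to the default pair
      have hLnil : L = [] := by
        have := PySem.List.sorted2_perm L Prod.fst Prod.snd false
        rw [← hS, hScases] at this
        exact this.symm.eq_nil
      have hRAnil : RA = [] := (hperm.trans (hLnil ▸ List.Perm.refl [])).eq_nil
      simp [hRAnil, List.getD]
    · have hLne : L ≠ [] := by
        intro hc
        have hnil : S = [] := by rw [hS, hc]; rfl
        rw [hScases] at hnil
        exact List.cons_ne_nil a t hnil
      have hhead := root_eq_sorted_head RA L hperm hLne hroot
      rw [← hS, hScases] at hhead
      rcases t with _ | ⟨b, t2⟩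
      · -- single candidate: tie branch impossible on both sides
        simp [List.getD, hhead]
      · -- two or more candidates
        by_cases htie : a.1 = b.1
        · simp [List.getD, htie.symm]
        · have htie' : ¬ b.1 = a.1 := fun h => htie h.symm
          simp [List.getD, htie, htie', hhead]
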